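-- pv_equiv track=rewrite | github.com/tezeladata/algorithmical | Main account/codewars/Python/extra_kata4.py | men_from_boys
-- ===== SOURCE A (Python) =====
-- def men_from_boys(arr):
--     even_arr=[]
--     for num in sorted(arr):
--         if num%2==0:
--             even_arr.append(num)
--     arr.sort(reverse=True)
--     odd_arr=[]
--     for num in arr:
--         if num%2!=0:
--             odd_arr.append(num)
--     arr1=[]
--     for i in even_arr:
--         arr1.append(i)
--     for i in odd_arr:
--         arr1.append(i)
--     res=[]
--     for num in arr1:
--         if num not in res:
--             res.append(num)
--     return res
-- ===== SOURCE B (Python) =====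
-- def men_from_boys(arr):
--     arr.sort(reverse=True)
--     seen = set()
--     evens = []
--     odds = []
--     for num in arr:
--         if num not in seen:
--             seen.add(num)
--             if num % 2:
--                 odds.append(num)
--             else:
--                 evens.append(num)
--     evens.reverse()
--     return evens + odds
-- ===== Notes on version B (the rewrite author's own statement) =====
-- stated objective: faster
-- what changed: One descending sort and a single fused classify-and-dedup pass with a seen set (evens reversed at the end) replace A's two sorts, two filter loops, a concat loop and an O(n^2) membership-list dedup.
import Mathlib
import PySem

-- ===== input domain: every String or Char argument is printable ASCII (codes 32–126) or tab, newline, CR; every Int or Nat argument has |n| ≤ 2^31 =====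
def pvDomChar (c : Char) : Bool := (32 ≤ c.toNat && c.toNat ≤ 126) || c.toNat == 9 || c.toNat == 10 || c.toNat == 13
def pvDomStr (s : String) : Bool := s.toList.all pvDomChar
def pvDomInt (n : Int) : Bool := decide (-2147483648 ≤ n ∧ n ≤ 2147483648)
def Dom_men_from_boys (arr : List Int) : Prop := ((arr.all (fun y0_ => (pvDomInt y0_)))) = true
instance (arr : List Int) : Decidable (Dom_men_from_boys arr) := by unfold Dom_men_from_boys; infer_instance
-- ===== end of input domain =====

-- B replaces A's two sorts, two filter loops, concat loop and quadratic list dedup by one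
-- descending sort plus a single fused classify-and-dedup pass with a seen set (faster).
-- Like A, the Python B sorts the caller's list in place (same mutation); the theorems are
-- about the return value.

-- ===== PORT A =====
def men_from_boys (arr : List Int) : List Int :=
  let even_arr := (PySem.List.sorted arr (fun x => x) false).foldl
    (fun acc num => if PySem.Int.mod num 2 == 0 then acc ++ [num] else acc) []
  let arr2 := PySem.List.sorted arr (fun x => x) true
  let odd_arr := arr2.foldl
    (fun acc num => if PySem.Int.mod num 2 != 0 then acc ++ [num] else acc) []
  let arr1 := even_arr.foldl (fun acc i => acc ++ [i]) []
  let arr1 := odd_arr.foldl (fun acc i => acc ++ [i]) arr1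
  arr1.foldl (fun res num => if num ∈ res then res else res ++ [num]) []

-- ===== PORT B =====
def men_from_boys_alt (arr : List Int) : List Int :=
  let d := PySem.List.sorted arr (fun x => x) true
  let st := d.foldl
    (fun (st : PySem.Set Int × List Int × List Int) num =>
      if PySem.Set.contains st.1 num then st
      else (PySem.Set.add st.1 num,
            if PySem.Int.mod num 2 != 0 then (st.2.1, st.2.2 ++ [num])
            else (st.2.1 ++ [num], st.2.2)))
    (PySem.Set.empty, ([], []))
  st.2.1.reverse ++ st.2.2

-- ===== PRECONDITION & SPEC =====
def Spec_men_from_boys (arr : List Int) (out : List Int) : Prop := out = men_from_boys_alt arr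
instance (arr : List Int) (out : List Int) : Decidable (Spec_men_from_boys arr out) := by unfold Spec_men_from_boys; infer_instance

-- ===== CLAIM (what is proved, stated in full; the proofs are below) =====
def Claim_equal_men_from_boys : Prop := ∀ (arr : List Int), Dom_men_from_boys arr → Spec_men_from_boys arr (men_from_boys arr)

-- ===== LEMMAS AND PROOFS =====

-- the dedup loop of A, with an explicit accumulator
def pvDD (r : List Int) (l : List Int) : List Int :=
  l.foldl (fun res num => if num ∈ res then res else res ++ [num]) r

theorem pvDD_eq (r l : List Int) :
    l.foldl (fun res num => if num ∈ res then res else res ++ [num]) r = pvDD r l := rfl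

theorem pvDD_cons (r : List Int) (x : Int) (l : List Int) :
    pvDD r (x :: l) = pvDD (if x ∈ r then r else r ++ [x]) l := rfl

theorem mem_pvDD (r l : List Int) (x : Int) : x ∈ pvDD r l ↔ x ∈ r ∨ x ∈ l := by
  induction l generalizing r with
  | nil => simp [pvDD]
  | cons a l ih =>
    rw [pvDD_cons, ih]
    by_cases h : a ∈ r
    · simp only [if_pos h, List.mem_cons]
      constructor
      · rintro (hx | hx)
        exacts [Or.inl hx, Or.inr (Or.inr hx)]
      · rintro (hx | hx | hx)
        exacts [Or.inl hx, Or.inl (by rw [hx]; exact h), Or.inr hx]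
    · simp only [if_neg h, List.mem_append, List.mem_cons]
      tauto

theorem pvDD_append_single (r l : List Int) (x : Int) :
    pvDD r (l ++ [x]) = (if x ∈ pvDD r l then pvDD r l else pvDD r l ++ [x]) := by
  simp [pvDD, List.foldl_append]

-- A's dedup keeps first occurrences: it is reverse ∘ Mathlib-dedup (last occurrences) ∘ reverse
theorem pvDD_eq_reverse_dedup (l : List Int) : pvDD [] l = (l.reverse.dedup).reverse := by
  induction l using List.reverseRecOn with
  | nil => rfl
  | append_singleton l x ih =>
    rw [pvDD_append_single, ih]
    by_cases h : x ∈ l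
    · have hx : x ∈ l.reverse.dedup.reverse := by simp [h]
      rw [if_pos hx, List.reverse_append, List.reverse_singleton, List.singleton_append,
        List.dedup_cons_of_mem (by simpa using h)]
    · have hx : x ∉ l.reverse.dedup.reverse := by simp [h]
      rw [if_neg hx, List.reverse_append, List.reverse_singleton, List.singleton_append,
        List.dedup_cons_of_notMem (by simpa using h), List.reverse_cons]

-- on a ≤-sorted list, keep-first and keep-last dedup agree
theorem dedup_reverse_of_sorted (m : List Int) (hm : m.Pairwise (· ≤ ·)) :
    m.dedup = (m.reverse.dedup).reverse := by
  apply PySem.List.eq_of_perm_of_pairwise_le_of_injective (fun x => x) (fun a b h => h)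
  · apply (List.perm_ext_iff_of_nodup (List.nodup_dedup m) (by simp [List.nodup_dedup])).mpr
    intro x; simp [List.mem_dedup]
  · exact List.Pairwise.sublist (List.dedup_sublist m) hm
  · rw [List.pairwise_reverse]
    exact List.Pairwise.sublist (List.dedup_sublist m.reverse) (by simpa [List.pairwise_reverse] using hm)

theorem pvDD_reverse_of_sorted (m : List Int) (hm : m.Pairwise (· ≤ ·)) :
    (pvDD [] m.reverse).reverse = pvDD [] m := by
  rw [pvDD_eq_reverse_dedup, pvDD_eq_reverse_dedup, List.reverse_reverse,
    ← dedup_reverse_of_sorted m hm]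
  simp

-- splitting A's dedup over the even/odd concatenation
theorem pvDD_append_disjoint (o : List Int) (E r : List Int) (h : ∀ x ∈ o, x ∉ E) :
    pvDD (E ++ r) o = E ++ pvDD r o := by
  induction o generalizing r with
  | nil => simp [pvDD]
  | cons a o ih =>
    rw [pvDD_cons, pvDD_cons]
    have ha : a ∉ E := h a (by simp)
    have : (a ∈ E ++ r) = (a ∈ r) := by simp [ha]
    by_cases hr : a ∈ r
    · simp only [List.mem_append, ha, false_or, if_pos hr]
      exact ih r (fun x hx => h x (by simp [hx]))
    · simp only [List.mem_append, ha, false_or, if_neg hr, List.append_assoc]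
      exact ih (r ++ [a]) (fun x hx => h x (by simp [hx]))

-- filter loops
theorem foldl_filter_append (p : Int → Bool) (l acc : List Int) :
    l.foldl (fun acc num => if p num then acc ++ [num] else acc) acc = acc ++ l.filter p := by
  induction l generalizing acc with
  | nil => simp
  | cons a l ih =>
    by_cases h : p a <;> simp [List.foldl_cons, h, ih]

-- descending sort of Ints is the reverse of the ascending sort
theorem sorted_true_eq_reverse (arr : List Int) :
    PySem.List.sorted arr (fun x => x) true = (PySem.List.sorted arr (fun x => x) false).reverse := by
  have h : (PySem.List.sorted arr (fun x => x) true).reverse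
      = PySem.List.sorted arr (fun x => x) false := by
    apply PySem.List.eq_of_perm_of_pairwise_le_of_injective (fun x => x) (fun a b h => h)
    · exact ((List.reverse_perm _).trans
        (PySem.List.sorted_perm arr (fun x => x) true)).trans
        (PySem.List.sorted_perm arr (fun x => x) false).symm
    · rw [List.pairwise_reverse]
      exact PySem.List.sorted_pairwise_rev arr (fun x => x)
    · exact PySem.List.sorted_pairwise arr (fun x => x)
  rw [← h, List.reverse_reverse]

-- B's fused pass, characterised: with a consistent seen set, the two output lists are
-- A-style dedups of the parity filters
theorem bfold_spec (l : List Int) (seen ev od : List Int)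
    (hs : ∀ x, x ∈ seen ↔ x ∈ ev ∨ x ∈ od)
    (hev : ∀ x ∈ ev, (PySem.Int.mod x 2 != 0) = false)
    (hod : ∀ x ∈ od, (PySem.Int.mod x 2 != 0) = true) :
    (l.foldl
      (fun (st : PySem.Set Int × List Int × List Int) num =>
        if PySem.Set.contains st.1 num then st
        else (PySem.Set.add st.1 num,
              if PySem.Int.mod num 2 != 0 then (st.2.1, st.2.2 ++ [num])
              else (st.2.1 ++ [num], st.2.2)))
      (seen, (ev, od))).2
    = (pvDD ev (l.filter (fun num => !(PySem.Int.mod num 2 != 0))),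
       pvDD od (l.filter (fun num => PySem.Int.mod num 2 != 0))) := by
  induction l generalizing seen ev od with
  | nil => simp [pvDD]
  | cons a l ih =>
    by_cases hmem : a ∈ seen
    · have hc : PySem.Set.contains seen a = true := by
        simpa [PySem.Set.contains] using hmem
      rw [List.foldl_cons]
      simp only [hc, if_true]
      rw [ih seen ev od hs hev hod]
      rcases (hs a).mp hmem with hae | hao
      · have hpa := hev a hae
        rw [List.filter_cons, List.filter_cons, hpa]
        simp only [Bool.not_false, if_true, Bool.false_eq_true, if_false]
        rw [pvDD_cons, if_pos hae]
      · have hpa := hod a hao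
        rw [List.filter_cons, List.filter_cons, hpa]
        simp only [Bool.not_true, Bool.false_eq_true, if_false, if_true]
        rw [pvDD_cons, if_pos hao]
    · have hc : PySem.Set.contains seen a = false := by
        simpa [PySem.Set.contains] using hmem
      have hadd : PySem.Set.add seen a = seen ++ [a] := by
        simp [PySem.Set.add, hmem]
      rw [List.foldl_cons]
      simp only [hc, Bool.false_eq_true, if_false, hadd]
      have hane : a ∉ ev ∧ a ∉ od := by
        constructor <;> intro hx <;> exact hmem ((hs a).mpr (by tauto))
      by_cases hp : (PySem.Int.mod a 2 != 0) = true
      · simp only [hp, if_true]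
        rw [ih (seen ++ [a]) ev (od ++ [a])
          (by intro x; simp [hs x]; tauto)
          hev
          (by intro x hx; rcases List.mem_append.mp hx with h | h
              · exact hod x h
              · simp at h; subst h; exact hp)]
        rw [List.filter_cons, List.filter_cons, hp]
        simp only [Bool.not_true, Bool.false_eq_true, if_false, if_true]
        rw [pvDD_cons, if_neg hane.2]
      · have hp' : (PySem.Int.mod a 2 != 0) = false := by
          cases h : (PySem.Int.mod a 2 != 0) <;> simp_all
        simp only [hp', Bool.false_eq_true, if_false]
        rw [ih (seen ++ [a]) (ev ++ [a]) od
          (by intro x; simp [hs x]; tauto)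
          (by intro x hx; rcases List.mem_append.mp hx with h | h
              · exact hev x h
              · simp at h; subst h; exact hp')
          hod]
        rw [List.filter_cons, List.filter_cons, hp']
        simp only [Bool.not_false, if_true, Bool.false_eq_true, if_false]
        rw [pvDD_cons, if_neg hane.1]

-- concatenating the two dedups = dedup of the concatenation, when the parts share no element
theorem pvDD_append (e o : List Int) (h : ∀ x ∈ o, x ∉ e) :
    pvDD [] (e ++ o) = pvDD [] e ++ pvDD [] o := by
  have h' : ∀ x ∈ o, x ∉ pvDD [] e := by
    intro x hx hmem
    exact h x hx (by simpa using (mem_pvDD [] e x).mp hmem)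
  have : pvDD [] (e ++ o) = pvDD (pvDD [] e ++ []) o := by
    simp [pvDD, List.foldl_append]
  rw [this, pvDD_append_disjoint o (pvDD [] e) [] h']

theorem men_from_boys_eq (arr : List Int) : men_from_boys arr = men_from_boys_alt arr := by
  unfold men_from_boys men_from_boys_alt
  rw [sorted_true_eq_reverse arr]
  dsimp only []
  set s := PySem.List.sorted arr (fun x => x) false with hs
  have hsort : s.Pairwise (· ≤ ·) := PySem.List.sorted_pairwise arr (fun x => x)
  rw [foldl_filter_append (fun num => PySem.Int.mod num 2 == 0) s [],
    foldl_filter_append (fun num => PySem.Int.mod num 2 != 0) s.reverse [],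
    PySem.List.foldl_append_singleton, PySem.List.foldl_append_singleton]
  simp only [PySem.Set.empty]
  rw [bfold_spec s.reverse [] [] [] (by simp) (by simp) (by simp)]
  simp only [List.nil_append, pvDD_eq]
  have hfe : (fun num => !(PySem.Int.mod num 2 != 0)) = (fun num => PySem.Int.mod num 2 == 0) := by
    funext n; simp [bne]
  rw [hfe, List.filter_reverse, List.filter_reverse,
    pvDD_reverse_of_sorted (s.filter (fun num => PySem.Int.mod num 2 == 0))
      (List.Pairwise.filter _ hsort),
    pvDD_append]
  intro x hx hmem
  have h1 := List.of_mem_filter hmem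
  have h2 := List.of_mem_filter (List.mem_reverse.mp hx)
  simp [bne] at h1 h2
  omega

-- ===== VERDICT (by name: the statement is the Claim_ definition above) =====
theorem men_from_boys_spec : Claim_equal_men_from_boys := by
  intro arr _
  unfold Spec_men_from_boys
  exact men_from_boys_eq arr
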